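-- pv_equiv track=rewrite | github.com/HasanUzb/demo | 1 uyga.py | rangli_harflar
-- ===== SOURCE A (Python) =====
-- def rangli_harflar(text):
--     qizil = "\033[91m"
--     sariq = "\033[93m"
--     yashil = "\033[92m"
--     a = "\033[0m"
--     natija = ""
--
--     for harf in text:
--         if harf in "AaBbCcDdEeFfGgHh":
--             natija += qizil + harf + a
--         elif harf in "IiJjKkLlMmNnOoPp":
--             natija += sariq + harf + a
--         elif harf in "QqRrSsTtUuVvWwXxYyZz":
--             natija += yashil + harf + a
--         else:
--             natija += harf
--
--     return natija
-- ===== SOURCE B (Python) =====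
-- def rangli_harflar(text):
--     colors = ["\033[91m", "\033[93m", "\033[92m"]
--     reset = "\033[0m"
--     pieces = []
--     for harf in text:
--         c = harf.lower()
--         if 'a' <= c <= 'z':
--             pieces.append(colors[min((ord(c) - ord('a')) // 8, 2)] + harf + reset)
--         else:
--             pieces.append(harf)
--     return ''.join(pieces)
-- ===== Notes on version B (the rewrite author's own statement) =====
-- stated objective: alternative
-- what changed: Replaces the three explicit membership-string branches by closed-form arithmetic on the character's alphabet position (lowercase it, group = min(position // 8, 2), color table lookup), joining collected pieces instead of repeated string concatenation.
import Mathlib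
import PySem

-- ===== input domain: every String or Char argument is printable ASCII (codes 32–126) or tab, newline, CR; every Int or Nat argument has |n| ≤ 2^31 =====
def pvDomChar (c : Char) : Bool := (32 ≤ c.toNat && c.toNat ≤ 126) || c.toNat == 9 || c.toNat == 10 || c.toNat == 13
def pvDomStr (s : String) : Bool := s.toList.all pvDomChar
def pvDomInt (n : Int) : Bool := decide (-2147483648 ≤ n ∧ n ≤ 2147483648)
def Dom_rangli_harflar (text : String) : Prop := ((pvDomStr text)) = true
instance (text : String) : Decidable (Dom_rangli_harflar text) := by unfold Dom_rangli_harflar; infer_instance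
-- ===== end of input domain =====

-- B replaces A's three membership-string branches by closed-form arithmetic on the
-- letter's alphabet position with a color table; same output, alternative structure.


-- ===== PORT A =====
-- per-character body of A's loop ('harf in "…"' is exact single-char membership)
def segA (harf : Char) : List Char :=
  let qizil := "\x1b[91m".toList
  let sariq := "\x1b[93m".toList
  let yashil := "\x1b[92m".toList
  let a := "\x1b[0m".toList
  if "AaBbCcDdEeFfGgHh".toList.contains harf then qizil ++ [harf] ++ a
  else if "IiJjKkLlMmNnOoPp".toList.contains harf then sariq ++ [harf] ++ a
  else if "QqRrSsTtUuVvWwXxYyZz".toList.contains harf then yashil ++ [harf] ++ a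
  else [harf]

def rangli_harflar (text : String) : String :=
  String.mk (text.toList.foldl (fun natija harf => natija ++ segA harf) [])

-- ===== PORT B =====
-- per-character body of B's loop: arithmetic on the alphabet position
def segB (harf : Char) : List Char :=
  let colors := ["\x1b[91m".toList, "\x1b[93m".toList, "\x1b[92m".toList]
  let reset := "\x1b[0m".toList
  let c := PySem.Chars.lowerChar harf
  if 'a' ≤ c ∧ c ≤ 'z' then
    colors.getD (min ((c.toNat - 'a'.toNat) / 8) 2) [] ++ [harf] ++ reset
  else [harf]

def rangli_harflar_alt (text : String) : String :=
  String.mk ((text.toList.foldl (fun pieces harf => pieces ++ [segB harf]) []).flatten)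

-- ===== PRECONDITION & SPEC =====
def Spec_rangli_harflar (text : String) (out : String) : Prop := out = rangli_harflar_alt text
instance (text : String) (out : String) : Decidable (Spec_rangli_harflar text out) := by unfold Spec_rangli_harflar; infer_instance

-- ===== CLAIM (what is proved, stated in full; the proofs are below) =====
def Claim_equal_rangli_harflar : Prop := ∀ (text : String), Dom_rangli_harflar text → Spec_rangli_harflar text (rangli_harflar text)

-- ===== LEMMAS AND PROOFS =====
-- the per-character bodies agree on every domain character (checked over all 128 ASCII codes)
theorem segA_eq_segB_fin : ∀ n : Fin 128, pvDomChar (Char.ofNat n.val) = true →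
    segA (Char.ofNat n.val) = segB (Char.ofNat n.val) := by decide

theorem segA_eq_segB (c : Char) (h : pvDomChar c = true) : segA c = segB c := by
  have hlt : c.toNat < 128 := by
    simp only [pvDomChar, Bool.or_eq_true, Bool.and_eq_true, decide_eq_true_eq, beq_iff_eq] at h
    omega
  have := segA_eq_segB_fin ⟨c.toNat, hlt⟩ (by simpa [Char.ofNat_toNat] using h)
  simpa [Char.ofNat_toNat] using this

theorem foldl_eq (l : List Char) (acc : List Char)
    (h : ∀ c ∈ l, pvDomChar c = true) :
    l.foldl (fun natija harf => natija ++ segA harf) acc =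
      acc ++ (l.map segB).flatten := by
  induction l generalizing acc with
  | nil => simp
  | cons x t ih =>
    have hx := h x (List.mem_cons_self ..)
    have ht : ∀ c ∈ t, pvDomChar c = true := fun c hc => h c (List.mem_cons_of_mem _ hc)
    simp only [List.foldl_cons]
    rw [ih _ ht]
    simp [segA_eq_segB x hx]

-- ===== VERDICT (by name: the statement is the Claim_ definition above) =====
theorem rangli_harflar_spec : Claim_equal_rangli_harflar := by
  intro text hdom
  unfold Spec_rangli_harflar rangli_harflar rangli_harflar_alt
  have h : ∀ c ∈ text.toList, pvDomChar c = true := by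
    simpa [Dom_rangli_harflar, pvDomStr, List.all_eq_true] using hdom
  rw [foldl_eq _ _ h, PySem.List.foldl_append_singleton_eq_map]
  simp
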